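-- pv_equiv track=rewrite | github.com/Fortunoxx/AdventOfCode2023 | src/day02.py | get_minimum_items
-- ===== SOURCE A (Python) =====
-- def get_minimum_items(games):
--     items = []
--
--     for game_id in games:
--         data = {}
--         for game in games[game_id]:
--             for key in game:
--                 if key not in data:
--                     data[key] = game[key]
--                 elif data[key] < game[key]:
--                     data[key] = game[key]
--
--         items.append(data)
--
--     return items
-- ===== SOURCE B (Python) =====
-- def get_minimum_items(games):
--     items = []
--     for game_id in games:
--         rounds = games[game_id]
--         keys = dict.fromkeys(k for r in rounds for k in r)
--         items.append({k: max(r[k] for r in rounds if k in r) for k in keys})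
--     return items
-- ===== Notes on version B (the rewrite author's own statement) =====
-- stated objective: idiomatic
-- what changed: The round-by-round running-max dict update is replaced by collecting each game's keys once (dict.fromkeys) and building the result as a dict comprehension taking max() per key over the rounds containing it.
import Mathlib
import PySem

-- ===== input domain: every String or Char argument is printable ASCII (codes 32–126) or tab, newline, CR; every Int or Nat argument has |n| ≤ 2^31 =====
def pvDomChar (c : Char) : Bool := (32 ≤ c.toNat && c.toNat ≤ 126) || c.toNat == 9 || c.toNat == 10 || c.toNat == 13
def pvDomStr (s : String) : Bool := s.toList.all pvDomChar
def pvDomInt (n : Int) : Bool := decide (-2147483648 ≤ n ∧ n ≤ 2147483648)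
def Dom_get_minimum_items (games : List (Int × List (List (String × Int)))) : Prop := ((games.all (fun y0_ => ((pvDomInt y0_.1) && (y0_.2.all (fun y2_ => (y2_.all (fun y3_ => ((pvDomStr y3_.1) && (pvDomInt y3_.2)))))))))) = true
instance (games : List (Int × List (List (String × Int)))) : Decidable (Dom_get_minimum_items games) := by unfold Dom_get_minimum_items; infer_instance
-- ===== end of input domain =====

-- B replaces A's round-by-round running-max dict update with a key-by-key scan (collect each game's keys once, then max per key); same cost, more idiomatic.


-- ===== PORT A =====
-- `data[key] = game[key]` / `elif data[key] < game[key]: data[key] = game[key]` update step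
def pvUpd (data : PySem.Dict String Int) (k : String) (v : Int) : PySem.Dict String Int :=
  match data.get? k with
  | none => data.insert k v
  | some w => if w < v then data.insert k v else data

-- A's two inner loops for one game: `for game in games[game_id]: for key in game: …`
-- (a round is a dict: iterate its distinct keys in first-occurrence order; game[key] = first binding)
def pvGameA (rounds : List (List (String × Int))) : PySem.Dict String Int :=
  rounds.foldl (fun data r =>
    (PySem.List.dedup (r.map (·.1))).foldl
      (fun data key => pvUpd data key ((PySem.Dict.mk r).getD key 0)) data)
    PySem.Dict.empty

def get_minimum_items (games : List (Int × List (List (String × Int)))) : List (List (String × Int)) :=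
  (PySem.List.dedup (games.map (·.1))).foldl
    (fun items gid => items ++ [(pvGameA ((PySem.Dict.mk games).getD gid [])).items]) []

-- ===== PORT B =====
-- max(r[k] for r in rounds if k in r)  (the 0 default is never used: k occurs in some round)
def pvMaxFor (rounds : List (List (String × Int))) (k : String) : Int :=
  (PySem.List.max? (rounds.filterMap (fun r => (PySem.Dict.mk r).get? k)) (fun x => x)).getD 0

def get_minimum_items_alt (games : List (Int × List (List (String × Int)))) : List (List (String × Int)) :=
  (PySem.List.dedup (games.map (·.1))).foldl
    (fun items gid =>
      let rounds := (PySem.Dict.mk games).getD gid []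
      let keys := PySem.List.dedup (rounds.flatMap (fun r => PySem.List.dedup (r.map (·.1))))
      items ++ [keys.map (fun k => (k, pvMaxFor rounds k))]) []

-- ===== PRECONDITION & SPEC =====
def Spec_get_minimum_items (games : List (Int × List (List (String × Int)))) (out : List (List (String × Int))) : Prop := out = get_minimum_items_alt games
instance (games : List (Int × List (List (String × Int)))) (out : List (List (String × Int))) : Decidable (Spec_get_minimum_items games out) := by unfold Spec_get_minimum_items; infer_instance

-- ===== CLAIM (what is proved, stated in full; the proofs are below) =====
def Claim_equal_get_minimum_items : Prop := ∀ (games : List (Int × List (List (String × Int)))), Dom_get_minimum_items games → Spec_get_minimum_items games (get_minimum_items games)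

-- ===== LEMMAS AND PROOFS =====

-- a Nodup list filtered for one of its members is that singleton
theorem filter_beq_of_nodup {α : Type} [DecidableEq α] (l : List α) (a : α)
    (h : l.Nodup) (h2 : a ∈ l) : l.filter (· == a) = [a] := by
  induction l with
  | nil => simp at h2
  | cons x t ih =>
    have hn := List.nodup_cons.mp h
    rcases List.mem_cons.mp h2 with rfl | hm
    · have he : t.filter (· == a) = [] := by
        apply List.filter_eq_nil_iff.mpr
        intro b hb
        simp only [beq_iff_eq]
        intro e; exact hn.1 (e ▸ hb)
      simp [he]
    · have hx : (x == a) = false := by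
        simp only [beq_eq_false_iff_ne]; intro e; exact hn.1 (e ▸ hm)
      simp [hx, ih hn.2 hm]

-- value of A's data[k] as the (key, value) pairs stream past
def pvRunMax (o : Option Int) (vs : List Int) : Option Int :=
  vs.foldl (fun o v => some (max (o.getD v) v)) o

theorem pvRunMax_some (a : Int) (vs : List Int) : pvRunMax (some a) vs = some (vs.foldl max a) := by
  induction vs generalizing a with
  | nil => rfl
  | cons v t ih => simp [pvRunMax, List.foldl] at ih ⊢; exact ih _

theorem pvRunMax_eq_max? (vs : List Int) :
    pvRunMax none vs = PySem.List.max? vs (fun x => x) := by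
  cases vs with
  | nil => rfl
  | cons v t =>
    rw [PySem.List.max?_id_cons]
    have h : pvRunMax none (v :: t) = pvRunMax (some v) t := by simp [pvRunMax, List.foldl]
    rw [h, pvRunMax_some]

-- lookup through a pvUpd fold = running max over the matching values
theorem get?_foldUpd (l : List (String × Int)) (d : PySem.Dict String Int) (k : String) :
    (l.foldl (fun d p => pvUpd d p.1 p.2) d).get? k
      = pvRunMax (d.get? k) ((l.filter (fun p => p.1 == k)).map (·.2)) := by
  induction l generalizing d with
  | nil => rfl
  | cons p t ih =>
    rw [List.foldl_cons, ih]
    by_cases hk : p.1 = k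
    · subst hk
      have hstep : (pvUpd d p.1 p.2).get? p.1 = some (max ((d.get? p.1).getD p.2) p.2) := by
        unfold pvUpd
        cases h : d.get? p.1 with
        | none => simp [PySem.Dict.get?_insert_self]
        | some w =>
          simp only [Option.getD_some]
          by_cases hw : w < p.2
          · simp [hw, PySem.Dict.get?_insert_self, max_eq_right (le_of_lt hw)]
          · simp [hw, h, max_eq_left (not_lt.mp hw)]
      simp [pvRunMax, hstep]
    · have hstep : (pvUpd d p.1 p.2).get? k = d.get? k := by
        unfold pvUpd
        cases h : d.get? p.1 with
        | none => simp [PySem.Dict.get?_insert_of_ne d p.2 (fun h' => hk h'.symm)]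
        | some w =>
          by_cases hw : w < p.2
          · simp [hw, PySem.Dict.get?_insert_of_ne d p.2 (fun h' => hk h'.symm)]
          · simp [hw]
      simp [hk, hstep]

-- keys through one pvUpd = set-add
theorem keys_pvUpd (d : PySem.Dict String Int) (k : String) (v : Int) :
    (pvUpd d k v).keys = PySem.Set.add d.keys k := by
  unfold pvUpd
  cases h : d.get? k with
  | none =>
    have hc : d.contains k = false := by rw [PySem.Dict.contains_eq_isSome_get?, h]; rfl
    rw [PySem.Dict.keys_insert_of_not_contains d v hc]
    have hm : d.keys.contains k = false := by
      simp only [List.contains_eq_mem, decide_eq_false_iff_not]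
      intro hmem
      rw [← PySem.Dict.contains_iff_mem_keys] at hmem
      simp [hc] at hmem
    have hnm : k ∉ d.keys := by simpa using hm
    simp [PySem.Set.add, PySem.Set.contains, hnm]
  | some w =>
    have hc : d.contains k = true := by rw [PySem.Dict.contains_eq_isSome_get?, h]; rfl
    have hm : d.keys.contains k = true := by
      simp only [List.contains_eq_mem, decide_eq_true_eq]
      exact (PySem.Dict.contains_iff_mem_keys d k).mp hc
    have hmem : k ∈ d.keys := by simpa using hm
    by_cases hw : w < v
    · simp [hw, PySem.Dict.keys_insert_of_contains d v hc, PySem.Set.add, PySem.Set.contains, hmem]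
    · simp [hw, PySem.Set.add, PySem.Set.contains, hmem]

theorem nodup_keys_pvUpd (d : PySem.Dict String Int) (k : String) (v : Int)
    (h : d.keys.Nodup) : (pvUpd d k v).keys.Nodup := by
  unfold pvUpd
  cases hg : d.get? k with
  | none => exact PySem.Dict.nodup_keys_insert d k v h
  | some w =>
    by_cases hw : w < v
    · simpa [hw] using PySem.Dict.nodup_keys_insert d k v h
    · simpa [hw] using h

theorem keys_foldUpd (l : List (String × Int)) (d : PySem.Dict String Int) :
    (l.foldl (fun d p => pvUpd d p.1 p.2) d).keys = PySem.Set.update d.keys (l.map (·.1)) := by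
  induction l generalizing d with
  | nil => rfl
  | cons p t ih =>
    rw [List.foldl_cons, ih, List.map_cons]
    show _ = PySem.Set.update (PySem.Set.add d.keys p.1) (t.map (·.1))
    rw [keys_pvUpd]

theorem nodup_keys_foldUpd (l : List (String × Int)) (d : PySem.Dict String Int)
    (h : d.keys.Nodup) : (l.foldl (fun d p => pvUpd d p.1 p.2) d).keys.Nodup := by
  induction l generalizing d with
  | nil => exact h
  | cons p t ih => exact ih _ (nodup_keys_pvUpd _ _ _ h)

-- the (key, first-binding-value) pairs A streams through pvUpd for one round
def pvPairs (r : List (String × Int)) : List (String × Int) :=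
  (PySem.List.dedup (r.map (·.1))).map (fun k => (k, (PySem.Dict.mk r).getD k 0))

-- one round's contribution to the value stream of key k = its lookup, as a list
theorem pairs_filter (r : List (String × Int)) (k : String) :
    ((pvPairs r).filter (fun p => p.1 == k)).map (·.2)
      = ((PySem.Dict.mk r).get? k).toList := by
  unfold pvPairs
  rw [List.filter_map]
  by_cases hm : k ∈ PySem.List.dedup (r.map (·.1))
  · have h1 : (PySem.List.dedup (r.map (·.1))).filter
        ((fun p => p.1 == k) ∘ fun k' => (k', (PySem.Dict.mk r).getD k' 0)) = [k] := by
      simpa [Function.comp] using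
        filter_beq_of_nodup _ k (PySem.List.nodup_dedup (r.map (·.1))) hm
    rw [h1]
    have hk : k ∈ (PySem.Dict.mk r).keys := by
      simpa using (PySem.List.mem_dedup (r.map (·.1)) k).mp hm
    cases hg : (PySem.Dict.mk r).get? k with
    | none => exact absurd hk ((PySem.Dict.get?_eq_none_iff_not_mem_keys _ k).mp hg)
    | some w => simp [PySem.Dict.getD_eq_get?_getD, hg]
  · have h1 : (PySem.List.dedup (r.map (·.1))).filter
        ((fun p => p.1 == k) ∘ fun k' => (k', (PySem.Dict.mk r).getD k' 0)) = [] := by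
      apply List.filter_eq_nil_iff.mpr
      intro b hb
      simp only [Function.comp, beq_iff_eq]
      intro e; exact hm (e ▸ hb)
    have hg : (PySem.Dict.mk r).get? k = none := by
      apply (PySem.Dict.get?_eq_none_iff_not_mem_keys _ k).mpr
      intro hk
      exact hm ((PySem.List.mem_dedup (r.map (·.1)) k).mpr (by simpa using hk))
    rw [h1, hg]
    rfl

-- A's per-game dict, characterised: its items are B's comprehension
theorem gameA_eq (rounds : List (List (String × Int))) :
    (pvGameA rounds).items
      = (PySem.List.dedup (rounds.flatMap (fun r => PySem.List.dedup (r.map (·.1))))).map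
          (fun k => (k, pvMaxFor rounds k)) := by
  have hfold : pvGameA rounds
      = (rounds.flatMap pvPairs).foldl (fun d p => pvUpd d p.1 p.2) PySem.Dict.empty := by
    unfold pvGameA
    rw [List.flatMap_def, List.foldl_flatten, List.foldl_map]
    congr 1
    funext data r
    unfold pvPairs
    rw [List.foldl_map]
  have hkeymap : (rounds.flatMap pvPairs).map (·.1)
      = rounds.flatMap (fun r => PySem.List.dedup (r.map (·.1))) := by
    rw [List.map_flatMap]
    congr 1
    funext r
    unfold pvPairs
    have hid : ((fun x : String × Int => x.1) ∘ fun k => (k, (PySem.Dict.mk r).getD k 0)) = id := rfl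
    rw [List.map_map, hid, List.map_id]
  have hkeys : (pvGameA rounds).keys
      = PySem.List.dedup (rounds.flatMap (fun r => PySem.List.dedup (r.map (·.1)))) := by
    rw [hfold, keys_foldUpd, hkeymap]
    simp [PySem.Set.update, PySem.List.dedup_eq_ofList, PySem.Set.ofList_eq_foldl,
      PySem.Dict.keys_empty]
  have hnd : (pvGameA rounds).keys.Nodup := by
    rw [hfold]
    exact nodup_keys_foldUpd _ _ (by simp [PySem.Dict.keys_empty])
  have hval : ∀ k, (pvGameA rounds).getD k 0 = pvMaxFor rounds k := by
    intro k
    rw [PySem.Dict.getD_eq_get?_getD, hfold, get?_foldUpd]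
    have hvals : (((rounds.flatMap pvPairs).filter (fun p => p.1 == k)).map (·.2))
        = rounds.filterMap (fun r => (PySem.Dict.mk r).get? k) := by
      rw [List.filter_flatMap, List.map_flatMap]
      rw [List.filterMap_eq_flatMap_toList]
      congr 1
      funext r
      exact pairs_filter r k
    rw [hvals, PySem.Dict.get?_empty, pvRunMax_eq_max?]
    rfl
  rw [PySem.Dict.items_eq_map_keys _ hnd 0, hkeys]
  congr 1
  funext k
  rw [hval]

-- ===== VERDICT (by name: the statement is the Claim_ definition above) =====
theorem get_minimum_items_spec : Claim_equal_get_minimum_items := by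
  intro games _
  unfold Spec_get_minimum_items get_minimum_items get_minimum_items_alt
  simp only [gameA_eq]
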